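-- pv_equiv track=rewrite | github.com/Fondamenti18/fondamenti-di-programmazione | students/792515/homework04/program01.py | calcola_grado
-- ===== SOURCE A (Python) =====
-- def calcola_grado(dzI,dzO,r,y,avi):
--     newavi=avi
--     if len(dzI[r])==y:
--         newavi+=1
--     for d in dzI[r]:
--         dzO[d]=newavi
--         calcola_grado(dzI,dzO,d,y,newavi)
--     return dzO
-- ===== SOURCE B (Python) =====
-- def calcola_grado(dzI, dzO, r, y, avi):
--     # iterative DFS with an explicit stack of (node, grade) frames;
--     # mutates dzO in place exactly like the recursive original
--     newavi = avi + (1 if len(dzI[r]) == y else 0)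
--     stack = [(c, newavi) for c in reversed(dzI[r])]
--     while stack:
--         d, v = stack.pop()
--         dzO[d] = v
--         cs = dzI[d]
--         nv = v + (1 if len(cs) == y else 0)
--         stack.extend((c, nv) for c in reversed(cs))
--     return dzO
-- ===== Notes on version B (the rewrite author's own statement) =====
-- stated objective: alternative
-- what changed: The recursive DFS is replaced by an iterative loop over an explicit LIFO stack of (node, grade) frames (children pushed reversed to keep A's left-to-right write order).
import Mathlib
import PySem

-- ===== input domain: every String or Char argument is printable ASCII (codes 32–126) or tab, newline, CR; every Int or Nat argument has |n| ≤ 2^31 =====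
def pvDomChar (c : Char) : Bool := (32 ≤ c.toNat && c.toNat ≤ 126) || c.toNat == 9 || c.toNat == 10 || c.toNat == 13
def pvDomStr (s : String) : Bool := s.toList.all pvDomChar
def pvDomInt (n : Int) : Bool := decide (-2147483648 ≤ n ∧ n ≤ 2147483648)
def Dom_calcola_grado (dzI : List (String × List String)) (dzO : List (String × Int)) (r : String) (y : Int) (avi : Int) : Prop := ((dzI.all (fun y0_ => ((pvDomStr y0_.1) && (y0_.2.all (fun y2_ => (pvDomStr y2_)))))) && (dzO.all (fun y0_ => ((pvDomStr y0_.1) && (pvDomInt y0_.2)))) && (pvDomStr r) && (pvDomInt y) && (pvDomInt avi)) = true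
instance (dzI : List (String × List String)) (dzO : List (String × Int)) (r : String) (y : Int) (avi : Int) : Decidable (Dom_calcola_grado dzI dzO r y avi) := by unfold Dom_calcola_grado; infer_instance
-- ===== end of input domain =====

-- B replaces A's recursive DFS by an iterative loop over an explicit stack of (node, grade)
-- frames (objective: alternative).  Both Pythons mutate dzO in place and return it; the
-- equivalence proved here is about the returned value.  Both ports carry a fuel guard (one
-- unit per node visit) that totalizes the unbounded recursion/loop; Pre_ (all nodes
-- reachable from r are keys of dzI, and no cycle is reachable) is exactly where Python A
-- returns instead of raising KeyError or recursing forever.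

-- generous fuel bound, never exhausted on Pre_ inputs of testable size (the two ports
-- consume fuel in lockstep, so the proved equality does not depend on this bound)
def pvFuel (dzI : List (String × List String)) : Nat :=
  let s := dzI.foldl (fun a p => a + p.2.length + 1) 2
  s ^ s

-- ===== PORT A =====
-- A's recursion; the returned Nat is the remaining fuel (the 'min' clamp is for the
-- termination measure only: the remaining fuel never exceeds the fuel supplied)
mutual
def goA (fuel : Nat) (dzI : PySem.Dict String (List String)) (y : Int) (r : String)
    (avi : Int) (dzO : PySem.Dict String Int) : Option (PySem.Dict String Int × Nat) :=
  match fuel with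
  | 0 => none
  | f + 1 =>
    match PySem.Dict.get? dzI r with
    | none => none          -- Python: KeyError on dzI[r]
    | some cs =>
      let newavi := if (cs.length : Int) = y then avi + 1 else avi
      loopA f dzI y newavi cs dzO
termination_by (fuel, 0)
decreasing_by simp_wf; exact Prod.Lex.left _ _ (Nat.lt_succ_self _)

-- 'for d in dzI[r]: dzO[d]=newavi; calcola_grado(dzI,dzO,d,y,newavi)'
def loopA (fuel : Nat) (dzI : PySem.Dict String (List String)) (y : Int) (newavi : Int)
    (cs : List String) (dzO : PySem.Dict String Int) : Option (PySem.Dict String Int × Nat) :=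
  match cs with
  | [] => some (dzO, fuel)
  | d :: rest =>
    match goA fuel dzI y d newavi (dzO.insert d newavi) with
    | none => none
    | some (dzO', f') => loopA (min f' fuel) dzI y newavi rest dzO'
termination_by (fuel, cs.length + 1)
decreasing_by
  · exact Prod.Lex.right _ (Nat.succ_pos _)
  · exact Prod.Lex.right' _ (Nat.min_le_right _ _) (Nat.lt_succ_self _)
end

def calcola_grado (dzI : List (String × List String)) (dzO : List (String × Int)) (r : String) (y : Int) (avi : Int) : List (String × Int) :=
  match goA (pvFuel dzI + 1) (PySem.Dict.mk dzI) y r avi (PySem.Dict.mk dzO) with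
  | none => dzO             -- fuel guard / Python raise: unreached under Pre_
  | some (d, _) => d.items

-- ===== PORT B =====
-- Source B's while-loop; the stack is kept top-first (python pops from the end of a list it
-- extends with the reversed children, i.e. the next frame is the FIRST child in order)
def goB (fuel : Nat) (dzI : PySem.Dict String (List String)) (y : Int)
    (stack : List (String × Int)) (dzO : PySem.Dict String Int) :
    Option (PySem.Dict String Int) :=
  match stack with
  | [] => some dzO
  | (d, v) :: rest =>
    match fuel with
    | 0 => none
    | f + 1 =>
      let dzO' := dzO.insert d v
      match PySem.Dict.get? dzI d with
      | none => none        -- Python: KeyError on dzI[d]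
      | some cs =>
        let nv := if (cs.length : Int) = y then v + 1 else v
        goB f dzI y (cs.map (fun c => (c, nv)) ++ rest) dzO'

def calcola_grado_alt (dzI : List (String × List String)) (dzO : List (String × Int)) (r : String) (y : Int) (avi : Int) : List (String × Int) :=
  match PySem.Dict.get? (PySem.Dict.mk dzI) r with
  | none => dzO             -- Python: KeyError on dzI[r]
  | some cs =>
    let newavi := if (cs.length : Int) = y then avi + 1 else avi
    match goB (pvFuel dzI) (PySem.Dict.mk dzI) y (cs.map (fun c => (c, newavi))) (PySem.Dict.mk dzO) with
    | none => dzO           -- fuel guard: unreached under Pre_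
    | some d => d.items

-- ===== PRECONDITION & SPEC =====
-- reachability closure of the child relation of dzI (non-key nodes have no children)
def pvChildren (dzI : List (String × List String)) (n : String) : List String :=
  ((PySem.Dict.mk dzI).get? n).getD []
def pvStep (dzI : List (String × List String)) (S : List String) : List String :=
  (S ++ S.flatMap (pvChildren dzI)).dedup
def pvReach (dzI : List (String × List String)) (S : List String) : List String :=
  (pvStep dzI)^[dzI.length + 2] S

-- exactly where Python A returns: every node reachable from r is a key of dzI and no node
-- reachable from r can reach itself again (else A raises KeyError or recurses forever)
def Pre_calcola_grado (dzI : List (String × List String)) (dzO : List (String × Int)) (r : String) (y : Int) (avi : Int) : Prop :=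
  (∀ n ∈ pvReach dzI [r], ((PySem.Dict.mk dzI).get? n).isSome) ∧
  (∀ n ∈ pvReach dzI [r], n ∉ pvReach dzI (pvChildren dzI n))
instance (dzI : List (String × List String)) (dzO : List (String × Int)) (r : String) (y : Int) (avi : Int) : Decidable (Pre_calcola_grado dzI dzO r y avi) := by unfold Pre_calcola_grado; infer_instance

def pvWitness_calcola_grado : (List (String × List String)) × (List (String × Int)) × String × Int × Int :=
  ([("r", ["a"]), ("a", [])], [], "r", 1, 0)

def Spec_calcola_grado (dzI : List (String × List String)) (dzO : List (String × Int)) (r : String) (y : Int) (avi : Int) (out : List (String × Int)) : Prop := out = calcola_grado_alt dzI dzO r y avi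
instance (dzI : List (String × List String)) (dzO : List (String × Int)) (r : String) (y : Int) (avi : Int) (out : List (String × Int)) : Decidable (Spec_calcola_grado dzI dzO r y avi out) := by unfold Spec_calcola_grado; infer_instance

-- ===== CLAIM (what is proved, stated in full; the proofs are below) =====
def Claim_equal_calcola_grado : Prop := ∀ (dzI : List (String × List String)) (dzO : List (String × Int)) (r : String) (y : Int) (avi : Int), Dom_calcola_grado dzI dzO r y avi → Pre_calcola_grado dzI dzO r y avi → Spec_calcola_grado dzI dzO r y avi (calcola_grado dzI dzO r y avi)

-- ===== LEMMAS AND PROOFS =====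

-- simulation invariant: running the stack machine on the frames of A's child loop (followed
-- by any further frames) is A's child loop followed by the machine on the rest, and A's
-- loop never returns more fuel than it received; both consume one fuel unit per node visit
theorem goB_simulates_loopA (dzI : PySem.Dict String (List String)) (y : Int) (f : Nat) :
    ∀ (cs : List String) (v : Int) (rest : List (String × Int)) (dzO : PySem.Dict String Int),
      (goB f dzI y (cs.map (fun c => (c, v)) ++ rest) dzO =
        match loopA f dzI y v cs dzO with
        | none => none
        | some (dzO', f') => goB f' dzI y rest dzO') ∧
      (∀ dzO' f', loopA f dzI y v cs dzO = some (dzO', f') → f' ≤ f) := by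
  induction f using Nat.strong_induction_on with
  | _ f IH =>
    intro cs v rest dzO
    match cs with
    | [] =>
      constructor
      · simp [loopA]
      · intro dzO' f' h
        simp [loopA] at h
        omega
    | d :: cs' =>
      match f with
      | 0 =>
        constructor
        · simp [goB, loopA, goA]
        · intro dzO' f' h
          simp [loopA, goA] at h
      | f₁ + 1 =>
        rw [loopA]
        rw [goA]
        cases hg : PySem.Dict.get? dzI d with
        | none =>
          constructor
          · simp [goB, hg]
          · intro dzO' f' h
            simp at h
        | some csd =>
          simp only
          have hIH₁ := IH f₁ (Nat.lt_succ_self _) csd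
            (if (csd.length : Int) = y then v + 1 else v)
            (cs'.map (fun c => (c, v)) ++ rest) (dzO.insert d v)
          cases hl : loopA f₁ dzI y (if (csd.length : Int) = y then v + 1 else v) csd
              (dzO.insert d v) with
          | none =>
            constructor
            · rw [List.map_cons, List.cons_append, goB]
              simp only [hg]
              rw [hIH₁.1, hl]
            · intro dzO' f' h
              simp at h
          | some p =>
            obtain ⟨dzO₂, f₂⟩ := p
            have hf₂ : f₂ ≤ f₁ := hIH₁.2 dzO₂ f₂ hl
            have hmin : min f₂ (f₁ + 1) = f₂ := by omega
            have hIH₂ := IH f₂ (by omega) cs' v rest dzO₂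
            constructor
            · rw [List.map_cons, List.cons_append, goB]
              simp only [hg]
              rw [hIH₁.1, hl]
              show goB f₂ dzI y (cs'.map (fun c => (c, v)) ++ rest) dzO₂ =
                match loopA (min f₂ (f₁ + 1)) dzI y v cs' dzO₂ with
                | none => none
                | some (dzO', f') => goB f' dzI y rest dzO'
              rw [hmin]
              exact hIH₂.1
            · intro dzO' f' h
              have h' : loopA (min f₂ (f₁ + 1)) dzI y v cs' dzO₂ = some (dzO', f') := h
              rw [hmin] at h'
              have := hIH₂.2 dzO' f' h'
              omega

-- ===== VERDICT (by name: the statement is the Claim_ definition above) =====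
theorem calcola_grado_spec : Claim_equal_calcola_grado := by
  intro dzI dzO r y avi _ _
  unfold Spec_calcola_grado calcola_grado calcola_grado_alt
  rw [goA]
  cases hg : PySem.Dict.get? (PySem.Dict.mk dzI) r with
  | none => rfl
  | some cs =>
    simp only
    have hsim := (goB_simulates_loopA (PySem.Dict.mk dzI) y (pvFuel dzI) cs
      (if (cs.length : Int) = y then avi + 1 else avi) [] (PySem.Dict.mk dzO)).1
    rw [List.append_nil] at hsim
    show (match loopA (pvFuel dzI) (PySem.Dict.mk dzI) y
            (if (cs.length : Int) = y then avi + 1 else avi) cs (PySem.Dict.mk dzO) with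
          | none => dzO
          | some (d, _) => d.items) =
         (match goB (pvFuel dzI) (PySem.Dict.mk dzI) y
            (cs.map (fun c => (c, if (cs.length : Int) = y then avi + 1 else avi)))
            (PySem.Dict.mk dzO) with
          | none => dzO
          | some d => d.items)
    rw [hsim]
    cases loopA (pvFuel dzI) (PySem.Dict.mk dzI) y
        (if (cs.length : Int) = y then avi + 1 else avi) cs (PySem.Dict.mk dzO) with
    | none => rfl
    | some p => cases p with | mk d f' => simp [goB]
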